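-- pv_equiv track=rewrite | github.com/Ashuza11/cs50-intro-couse | python/pset6/dna/dna.py | Compute_longest_num_of_cons_seq_repeats
-- ===== SOURCE A (Python) =====
-- def Compute_longest_num_of_cons_seq_repeats(s, sub):
--     # Calculate the maximun num of times a substring is repeated
--     # O(len(s)): time complesty O(len(s)): Memory space
--     ans = [0] * len(s)
--     for i in range(len(s) - len(sub), - 1, -1):
--         if s[i: i + len(sub)] == sub:
--             if i + len(sub) > len(s) - 1:
--                 ans[i] = 1
--             else:
--                 ans[i] = 1 + ans[i + len(sub)]
--     return max(ans)
-- ===== SOURCE B (Python) =====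
-- def Compute_longest_num_of_cons_seq_repeats(s, sub):
--     # Count the run of back-to-back repeats directly from each start position
--     # with a while loop; no DP table over suffixes.
--     m = len(sub)
--     best = 0
--     for i in range(len(s)):
--         k = 0
--         j = i
--         while s[j:j+m] == sub:
--             k += 1
--             j += m
--         if k > best:
--             best = k
--     return best
-- ===== Notes on version B (the rewrite author's own statement) =====
-- stated objective: simpler
-- what changed: Replaces A's backward dynamic-programming table (ans array filled right-to-left, then max) with direct counting: for each start position a while loop counts the consecutive repeats, keeping a running maximum and no auxiliary array.
import Mathlib
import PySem

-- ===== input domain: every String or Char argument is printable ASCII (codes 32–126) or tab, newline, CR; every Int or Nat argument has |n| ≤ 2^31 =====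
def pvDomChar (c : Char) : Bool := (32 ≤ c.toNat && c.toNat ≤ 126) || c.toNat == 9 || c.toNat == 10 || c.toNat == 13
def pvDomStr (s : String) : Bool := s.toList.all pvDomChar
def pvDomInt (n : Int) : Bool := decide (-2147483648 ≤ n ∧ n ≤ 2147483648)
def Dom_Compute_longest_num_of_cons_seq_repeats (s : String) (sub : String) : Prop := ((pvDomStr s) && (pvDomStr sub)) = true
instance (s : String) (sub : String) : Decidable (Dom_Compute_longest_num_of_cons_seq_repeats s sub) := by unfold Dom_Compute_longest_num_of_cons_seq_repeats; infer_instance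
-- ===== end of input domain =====

-- B replaces A's backward DP table with direct per-start counting (simpler, no auxiliary array);
-- equivalence of the return values is proved for nonempty s and sub (elsewhere A raises).

-- ===== PORT A =====
-- loop body of A's `for i in range(len(s)-len(sub), -1, -1)` (i ≥ 0 throughout, so `ans[i] =` is `set i.toNat`
-- and `ans[i+len(sub)]` is in range, so `pyGetD` is exact)
def pvStepA (cs sb : List Char) (ans : List Int) (i : Int) : List Int :=
  if PySem.List.slice cs (some i) (some (i + (sb.length : Int))) = sb then
    if i + (sb.length : Int) > (cs.length : Int) - 1 then
      ans.set i.toNat 1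
    else
      ans.set i.toNat (1 + PySem.List.pyGetD ans (i + (sb.length : Int)) 0)
  else ans

def Compute_longest_num_of_cons_seq_repeats (s : String) (sub : String) : Int :=
  let cs := s.toList
  let sb := sub.toList
  let ans : List Int := List.replicate cs.length 0
  let ans := (PySem.List.pyRange ((cs.length : Int) - (sb.length : Int)) (-1) (-1)).foldl (pvStepA cs sb) ans
  (PySem.List.max? ans id).getD 0  -- max(ans): Python raises on []; Pre_ gives s ≠ "" so ans ≠ []

-- ===== PORT B =====
-- the inner `while s[j:j+m] == sub: k += 1; j += m` of Source B; fuel makes it total — the Python while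
-- terminates iff sub ≠ "" (Pre_), and then cs.length + 1 fuel is enough (j grows by len(sub) ≥ 1)
def pvRun (cs sb : List Char) : Nat → Nat → Nat
  | 0, _ => 0
  | fuel + 1, j =>
    if PySem.List.slice cs (some (j : Int)) (some ((j : Int) + (sb.length : Int))) = sb then
      pvRun cs sb fuel (j + sb.length) + 1
    else 0

def pvStepB (cs sb : List Char) (best : Int) (i : Nat) : Int :=
  let k : Int := (pvRun cs sb (cs.length + 1) i : Nat)
  if k > best then k else best

def Compute_longest_num_of_cons_seq_repeats_alt (s : String) (sub : String) : Int :=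
  let cs := s.toList
  let sb := sub.toList
  (List.range cs.length).foldl (pvStepB cs sb) 0

-- ===== PRECONDITION & SPEC =====
-- Pre_ excludes exactly the inputs where Python A raises: s = "" (ValueError: max of empty list)
-- and sub = "" (IndexError: ans[len(s)] assignment).
def Pre_Compute_longest_num_of_cons_seq_repeats (s : String) (sub : String) : Prop :=
  s ≠ "" ∧ sub ≠ ""
instance (s : String) (sub : String) : Decidable (Pre_Compute_longest_num_of_cons_seq_repeats s sub) := by
  unfold Pre_Compute_longest_num_of_cons_seq_repeats; infer_instance

def pvWitness_Compute_longest_num_of_cons_seq_repeats : String × String := ("ATGATGC", "ATG")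

def Spec_Compute_longest_num_of_cons_seq_repeats (s : String) (sub : String) (out : Int) : Prop := out = Compute_longest_num_of_cons_seq_repeats_alt s sub
instance (s : String) (sub : String) (out : Int) : Decidable (Spec_Compute_longest_num_of_cons_seq_repeats s sub out) := by unfold Spec_Compute_longest_num_of_cons_seq_repeats; infer_instance

-- ===== CLAIM (what is proved, stated in full; the proofs are below) =====
def Claim_equal_Compute_longest_num_of_cons_seq_repeats : Prop := ∀ (s : String) (sub : String), Dom_Compute_longest_num_of_cons_seq_repeats s sub → Pre_Compute_longest_num_of_cons_seq_repeats s sub → Spec_Compute_longest_num_of_cons_seq_repeats s sub (Compute_longest_num_of_cons_seq_repeats s sub)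


-- ===== LEMMAS AND PROOFS =====

-- a match at j needs the whole of sb inside cs
lemma pv_match_bound {cs sb : List Char} {j : Nat} (hm : sb ≠ [])
    (h : List.take sb.length (List.drop j cs) = sb) : j + sb.length ≤ cs.length := by
  have hl := congrArg List.length h
  simp [List.length_take, List.length_drop] at hl
  have : 0 < sb.length := List.length_pos_iff.mpr hm
  omega

-- the slice `s[j:j+m]` for a Nat start is take/drop
lemma pv_slice_eq (cs sb : List Char) (j : Nat) :
    PySem.List.slice cs (some (j : Int)) (some ((j : Int) + (sb.length : Int)))
      = List.take sb.length (List.drop j cs) := by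
  have h : ((j : Int) + (sb.length : Int)) = ((j + sb.length : Nat) : Int) := by omega
  rw [h, PySem.List.slice_natCast]
  congr 1
  omega

-- any two sufficient fuels compute the same run length
lemma pvRun_stable {cs sb : List Char} (hm : sb ≠ []) :
    ∀ f₁ f₂ j, cs.length < j + f₁ → cs.length < j + f₂ →
      pvRun cs sb f₁ j = pvRun cs sb f₂ j := by
  have hml : 0 < sb.length := List.length_pos_iff.mpr hm
  intro f₁
  induction f₁ with
  | zero =>
    intro f₂ j h1 h2
    cases f₂ with
    | zero => rfl
    | succ f =>
      simp only [pvRun, pv_slice_eq]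
      rw [if_neg]
      intro hc
      have := pv_match_bound hm hc
      omega
  | succ f ih =>
    intro f₂ j h1 h2
    cases f₂ with
    | zero =>
      simp only [pvRun, pv_slice_eq]
      rw [if_neg]
      intro hc
      have := pv_match_bound hm hc
      omega
    | succ f₂ =>
      simp only [pvRun, pv_slice_eq]
      by_cases hc : List.take sb.length (List.drop j cs) = sb
      · rw [if_pos hc, if_pos hc]
        have hb := pv_match_bound hm hc
        rw [ih f₂ (j + sb.length) (by omega) (by omega)]
      · rw [if_neg hc, if_neg hc]

-- the run length satisfies the natural recurrence
lemma pvChain_unfold {cs sb : List Char} (hm : sb ≠ []) (j : Nat) :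
    pvRun cs sb (cs.length + 1) j
      = if List.take sb.length (List.drop j cs) = sb
        then pvRun cs sb (cs.length + 1) (j + sb.length) + 1 else 0 := by
  have hml : 0 < sb.length := List.length_pos_iff.mpr hm
  conv_lhs => rw [pvRun]
  simp only [pv_slice_eq]
  by_cases hc : List.take sb.length (List.drop j cs) = sb
  · rw [if_pos hc, if_pos hc]
    rw [pvRun_stable hm cs.length (cs.length+1) (j + sb.length) (by omega) (by omega)]
  · rw [if_neg hc, if_neg hc]

lemma pvChain_zero {cs sb : List Char} (hm : sb ≠ []) {j : Nat}
    (h : cs.length < j + sb.length) : pvRun cs sb (cs.length + 1) j = 0 := by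
  rw [pvChain_unfold hm]
  rw [if_neg]
  intro hc
  have := pv_match_bound hm hc
  omega

-- Python's range(a, -1, -1) for a ≥ 0
lemma pv_pyRange_desc (a : Nat) :
    PySem.List.pyRange (a : Int) (-1) (-1) = (List.range (a+1)).map (fun (k : Nat) => (a : Int) - (k : Int)) := by
  simp only [PySem.List.pyRange]
  rw [if_neg (by norm_num), if_neg (by norm_num), if_pos (by omega : (-1:Int) < (a:Int))]
  have h : (((a:Int) - -1 + - -1 - 1) / - -1).toNat = a + 1 := by norm_num
  rw [h]
  apply List.map_congr_left
  intro k _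
  ring

lemma pv_pyRange_empty {n m : Nat} (h : n < m) :
    PySem.List.pyRange ((n : Int) - (m : Int)) (-1) (-1) = [] := by
  simp only [PySem.List.pyRange]
  rw [if_neg (by norm_num), if_neg (by norm_num), if_neg (by omega)]
  simp

lemma pvA_len (cs sb : List Char) : ∀ (l : List Int) (init : List Int),
    (l.foldl (pvStepA cs sb) init).length = init.length := by
  intro l
  induction l with
  | nil => intro init; rfl
  | cons x xs ih =>
    intro init
    rw [List.foldl_cons, ih]
    unfold pvStepA
    split <;> [skip; rfl]
    split <;> simp

-- loop invariant for A: after processing i = a, a-1, …, a-t+1 (a = n - m), slot j holds the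
-- run length starting at j for j ≥ a-t+1 and is still 0 below
lemma pv_getD_set (l : List Int) (k j : Nat) (v : Int) (hj : j < l.length) :
    (l.set k v).getD j 0 = if k = j then v else l.getD j 0 := by
  simp [List.getD_eq_getElem?_getD, hj]
  split <;> simp_all

lemma pv_getD_replicate (n j : Nat) (hj : j < n) : (List.replicate n (0:Int)).getD j 0 = 0 := by
  simp [List.getD_eq_getElem?_getD, hj]

lemma pvA_inv (cs sb : List Char) (hm : sb ≠ []) (hmn : sb.length ≤ cs.length) :
    ∀ t, t ≤ cs.length - sb.length + 1 →
    ∀ j, j < cs.length →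
      (((List.range t).map (fun (k : Nat) => ((cs.length - sb.length : Nat) : Int) - (k : Int))).foldl
          (pvStepA cs sb) (List.replicate cs.length (0 : Int))).getD j 0
        = if cs.length - sb.length + 1 ≤ j + t then (pvRun cs sb (cs.length + 1) j : Int) else 0 := by
  have hml : 0 < sb.length := List.length_pos_iff.mpr hm
  intro t
  induction t with
  | zero =>
    intro _ j hj
    simp only [List.range_zero, List.map_nil, List.foldl_nil]
    rw [pv_getD_replicate _ _ hj]
    split
    · rw [pvChain_zero hm (by omega)]; rfl
    · rfl
  | succ t ih =>
    intro ht j hj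
    have hta : t ≤ cs.length - sb.length := by omega
    rw [List.range_succ, List.map_append, List.foldl_append, List.map_singleton,
        List.foldl_cons, List.foldl_nil]
    have hcast : ((cs.length - sb.length : Nat) : Int) - (t : Int)
        = ((cs.length - sb.length - t : Nat) : Int) := by omega
    set a := cs.length - sb.length with ha
    set L := ((List.range t).map (fun (k : Nat) => ((a : Nat) : Int) - (k : Int))).foldl
        (pvStepA cs sb) (List.replicate cs.length (0 : Int)) with hL
    have hLlen : L.length = cs.length := by
      rw [hL, pvA_len, List.length_replicate]
    unfold pvStepA
    rw [hcast, pv_slice_eq, Int.toNat_natCast]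
    by_cases hC : List.take sb.length (List.drop (a - t) cs) = sb
    · rw [if_pos hC]
      have hbd : (a - t) + sb.length ≤ cs.length := pv_match_bound hm hC
      have hchainC : pvRun cs sb (cs.length + 1) (a - t)
          = pvRun cs sb (cs.length + 1) (a - t + sb.length) + 1 := by
        rw [pvChain_unfold hm (a - t), if_pos hC]
      by_cases hB : (((a - t : Nat) : Int)) + (sb.length : Int) > (cs.length : Int) - 1
      · -- boundary write ans[i] = 1: only reachable at t = 0 (i = len(s) - len(sub))
        have ht0 : t = 0 := by omega
        rw [if_pos hB]
        subst ht0
        have hL0 : L = List.replicate cs.length (0 : Int) := by rw [hL]; simp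
        have hchain : pvRun cs sb (cs.length + 1) (a - 0) = 1 := by
          rw [hchainC, pvChain_zero hm (by omega)]
        rw [hL0, pv_getD_set _ _ _ _ (by simpa using hj)]
        split
        · rw [(by omega : j = a - 0), hchain]
          norm_num
        · rw [pv_getD_replicate _ _ hj]
          split
          · rw [pvChain_zero hm (by omega)]; rfl
          · rfl
      · -- interior write ans[i] = 1 + ans[i + len(sub)]
        have ht1 : 1 ≤ t := by omega
        rw [if_neg hB]
        have hcast2 : ((a - t : Nat) : Int) + (sb.length : Int)
            = ((a - t + sb.length : Nat) : Int) := by omega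
        rw [hcast2, PySem.List.pyGetD_natCast]
        have hgetL : L.getD (a - t + sb.length) 0
            = (pvRun cs sb (cs.length + 1) (a - t + sb.length) : Int) := by
          rw [ih (by omega) _ (by omega), if_pos (by omega)]
        rw [hgetL, pv_getD_set _ _ _ _ (by rw [hLlen]; exact hj)]
        split
        · rename_i hkj
          rw [← hkj, if_pos (by omega), hchainC]
          push_cast
          ring
        · rename_i hkj
          rw [ih (by omega) j hj]
          split <;> split
          · rfl
          · omega
          · omega
          · rfl
    · -- no match at i: the slot keeps its 0, which is the run length there
      rw [if_neg hC]
      have hchain0 : pvRun cs sb (cs.length + 1) (a - t) = 0 := by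
        rw [pvChain_unfold hm (a - t), if_neg hC]
      rw [ih (by omega) j hj]
      split <;> split
      · rfl
      · omega
      · rename_i h1 h2
        have hj' : j = a - t := by omega
        rw [hj', hchain0]
        rfl
      · rfl

-- A's result is max over the list of run lengths
lemma pvA_eq (cs sb : List Char) (hm : sb ≠ []) :
    (PySem.List.pyRange ((cs.length : Int) - (sb.length : Int)) (-1) (-1)).foldl
        (pvStepA cs sb) (List.replicate cs.length 0)
      = (List.range cs.length).map (fun j => (pvRun cs sb (cs.length + 1) j : Int)) := by
  have hml : 0 < sb.length := List.length_pos_iff.mpr hm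
  by_cases hmn : sb.length ≤ cs.length
  · have hc : (cs.length : Int) - (sb.length : Int) = ((cs.length - sb.length : Nat) : Int) := by omega
    rw [hc, pv_pyRange_desc]
    apply List.ext_getElem
    · rw [pvA_len, List.length_replicate, List.length_map, List.length_range]
    · intro j h1 h2
      have hj : j < cs.length := by
        rw [pvA_len, List.length_replicate] at h1; exact h1
      rw [← List.getD_eq_getElem _ 0 h1]
      rw [pvA_inv cs sb hm hmn (cs.length - sb.length + 1) (by omega) j hj,
          if_pos (by omega)]
      simp
  · rw [pv_pyRange_empty (by omega)]
    simp only [List.foldl_nil]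
    apply List.ext_getElem
    · rw [List.length_replicate, List.length_map, List.length_range]
    · intro j h1 h2
      have hj : j < cs.length := by simpa using h1
      rw [List.getElem_replicate]
      have : pvRun cs sb (cs.length + 1) j = 0 := pvChain_zero hm (by omega)
      simp [this]

-- max(xs) for a nonempty list of nonnegatives equals B's running-max fold
lemma pv_fold_max : ∀ (l : List Int), (∀ x ∈ l, 0 ≤ x) → l ≠ [] →
    l.foldl (fun b x => if x > b then x else b) 0 = (PySem.List.max? l id).getD 0 := by
  intro l hpos hne
  have hf : (fun (b x : Int) => if x > b then x else b) = max := by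
    funext b x
    simp only [max_def]
    split <;> split <;> omega
  cases l with
  | nil => exact absurd rfl hne
  | cons x xs =>
    rw [hf]
    rw [show (id : Int → Int) = (fun y => y) from rfl]
    rw [PySem.List.max?_id_cons, List.foldl_cons]
    have hx : (0:Int) ≤ x := hpos x (by simp)
    rw [max_eq_right hx]
    rfl

-- ===== VERDICT (by name: the statement is the Claim_ definition above) =====
theorem Compute_longest_num_of_cons_seq_repeats_spec : Claim_equal_Compute_longest_num_of_cons_seq_repeats := by
  intro s sub _ hpre
  obtain ⟨hs, hsub⟩ := hpre
  have hcs : s.toList ≠ [] := by simpa [String.toList_eq_nil_iff] using hs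
  have hsb : sub.toList ≠ [] := by simpa [String.toList_eq_nil_iff] using hsub
  show _ = _
  unfold Compute_longest_num_of_cons_seq_repeats Compute_longest_num_of_cons_seq_repeats_alt
  simp only []
  rw [pvA_eq s.toList sub.toList hsb]
  rw [← pv_fold_max]
  · rw [List.foldl_map]
    rfl
  · intro x hx
    simp only [List.mem_map] at hx
    obtain ⟨j, _, rfl⟩ := hx
    positivity
  · simpa using hcs
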